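-- pv_equiv track=rewrite | github.com/OlaszPL/Introduction_to_computer_science_course | Zestaw3/zad20.py | longest_part
-- ===== SOURCE A (Python) =====
-- MAX_NUM_VAL = 1000
--
-- def longest_part(t):
--     factors = [0] * (MAX_NUM_VAL + 1)
--     t_len = len(t)
--     max_len = 0
--     right = left = 0 # pointery
--
--     while right < t_len:
--         if max(factors) <= 1:
--             copy_num = t[right]
--
--             d = 2
--             while copy_num != 1:
--                 while copy_num % d == 0:
--                     factors[d] += 1
--                     copy_num //= d
--
--                 d += 1
--             right += 1
--
--         else:
--             copy_num = t[left]
--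
--             d = 2
--             while copy_num != 1:
--                 while copy_num % d == 0:
--                     factors[d] -= 1
--                     copy_num //= d
--
--                 d += 1
--             left += 1
--
--         if max(factors) <= 1:
--             max_len = right - left
--
--     return max_len
-- ===== SOURCE B (Python) =====
-- def factorize(n):
--     f = []
--     d = 2
--     while n != 1:
--         e = 0
--         while n % d == 0:
--             e += 1
--             n //= d
--         if e:
--             f.append((d, e))
--         d += 1
--     return f
--
-- def longest_part(t):
--     n = len(t)
--     cnt = {}        # prime -> multiplicity inside the window
--     over = 0        # number of primes whose multiplicity exceeds 1
--     best = 0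
--     left = right = 0
--     while right < n:
--         if over == 0:
--             for p, e in factorize(t[right]):
--                 c = cnt.get(p, 0)
--                 cnt[p] = c + e
--                 if c <= 1 and c + e >= 2:
--                     over += 1
--             right += 1
--         else:
--             for p, e in factorize(t[left]):
--                 c = cnt[p]
--                 cnt[p] = c - e
--                 if c >= 2 and c - e <= 1:
--                     over -= 1
--             left += 1
--         if over == 0:
--             best = right - left
--     return best
-- ===== Notes on version B (the rewrite author's own statement) =====
-- stated objective: alternative
-- what changed: B keeps the two-pointer window but replaces A's full max() scan over the 1001-entry factor array (done twice per loop iteration) by a dict of prime multiplicities plus an incrementally maintained counter of primes occurring more than once, with factorization grouped into (prime, exponent) pairs by a helper.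
import Mathlib
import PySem

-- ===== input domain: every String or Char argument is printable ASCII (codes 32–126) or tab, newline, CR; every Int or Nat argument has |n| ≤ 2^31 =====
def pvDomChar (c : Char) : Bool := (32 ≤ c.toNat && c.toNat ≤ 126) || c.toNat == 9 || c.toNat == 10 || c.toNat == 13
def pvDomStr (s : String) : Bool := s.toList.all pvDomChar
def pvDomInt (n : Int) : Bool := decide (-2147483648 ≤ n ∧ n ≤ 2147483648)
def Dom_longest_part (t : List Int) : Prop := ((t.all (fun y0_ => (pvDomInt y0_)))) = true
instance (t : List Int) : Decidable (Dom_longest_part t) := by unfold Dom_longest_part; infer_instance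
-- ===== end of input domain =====

-- B replaces A's full `max(factors)` scan over the 1001-entry array at every step by an
-- incrementally maintained dictionary of prime multiplicities plus a counter of primes occurring
-- more than once; the return values are proved identical on Pre_.

-- ===== PORT A =====
-- `factors[d] += delta` / `factors[d] -= delta`: Python raises IndexError when d is out of range
-- (a prime factor > 1000); those inputs are excluded by Pre_, the `none` branch keeps the port total.
def pvBumpA (F : List Int) (d delta : Int) : List Int :=
  match PySem.List.pyGet? F d with
  | some v => F.set d.toNat (v + delta)
  | none => F

-- inner `while copy_num % d == 0: factors[d] += delta; copy_num //= d` (fuel makes the loop total;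
-- on Pre_ the fuel is never exhausted)
def pvFacInnerA (fuel : Nat) (copy d delta : Int) (F : List Int) : Int × List Int :=
  match fuel with
  | 0 => (copy, F)
  | fuel + 1 =>
    if PySem.Int.mod copy d = 0 then
      pvFacInnerA fuel (PySem.Int.floordiv copy d) d delta (pvBumpA F d delta)
    else (copy, F)

-- outer `d = 2; while copy_num != 1: …; d += 1`
def pvFacLoopA (fuel : Nat) (copy d delta : Int) (F : List Int) : List Int :=
  match fuel with
  | 0 => F
  | fuel + 1 =>
    if copy = 1 then F
    else
      let r := pvFacInnerA fuel copy d delta F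
      pvFacLoopA fuel r.1 (d + 1) delta r.2

-- `while right < t_len: …` (one recursive call per iteration; fuel 2*len+1 covers every
-- terminating Python run; Python diverges on elements ≤ 0, excluded by Pre_)
def pvLoopA (fuel : Nat) (t : List Int) (tlen : Int) (F : List Int) (maxLen left right : Int) : Int :=
  match fuel with
  | 0 => maxLen
  | fuel + 1 =>
    if right < tlen then
      if (PySem.List.max? F (fun y => y)).getD 0 ≤ 1 then
        let copy := PySem.List.pyGetD t right 0
        let F' := pvFacLoopA (copy.toNat + 2) copy 2 1 F
        let m' := if (PySem.List.max? F' (fun y => y)).getD 0 ≤ 1 then right + 1 - left else maxLen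
        pvLoopA fuel t tlen F' m' left (right + 1)
      else
        -- Python reads t[left]; under Pre_ a shrink step only happens on a nonempty window, so left < tlen
        let copy := PySem.List.pyGetD t left 0
        let F' := pvFacLoopA (copy.toNat + 2) copy 2 (-1) F
        let m' := if (PySem.List.max? F' (fun y => y)).getD 0 ≤ 1 then right - (left + 1) else maxLen
        pvLoopA fuel t tlen F' m' (left + 1) right
    else maxLen

def longest_part (t : List Int) : Int :=
  pvLoopA (2 * t.length + 1) t (t.length : Int) (List.replicate 1001 0) 0 0 0

-- ===== PORT B =====
-- Source B's factorize: inner `while n % d == 0: e += 1; n //= d`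
def pvFacInnerB (fuel : Nat) (n d e : Int) : Int × Int :=
  match fuel with
  | 0 => (n, e)
  | fuel + 1 =>
    if PySem.Int.mod n d = 0 then
      pvFacInnerB fuel (PySem.Int.floordiv n d) d (e + 1)
    else (n, e)

def pvFacLoopB (fuel : Nat) (n d : Int) (f : List (Int × Int)) : List (Int × Int) :=
  match fuel with
  | 0 => f
  | fuel + 1 =>
    if n = 1 then f
    else
      let r := pvFacInnerB fuel n d 0
      pvFacLoopB fuel r.1 (d + 1) (if r.2 ≠ 0 then f ++ [(d, r.2)] else f)

def pvFactorize (n : Int) : List (Int × Int) := pvFacLoopB (n.toNat + 2) n 2 []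

-- one iteration of `for p, e in factorize(...)` in the grow branch
def pvAddStep (st : PySem.Dict Int Int × Int) (pe : Int × Int) : PySem.Dict Int Int × Int :=
  let c := st.1.getD pe.1 0
  (st.1.insert pe.1 (c + pe.2), if c ≤ 1 ∧ 2 ≤ c + pe.2 then st.2 + 1 else st.2)

-- shrink branch; Python's `cnt[p]` cannot raise KeyError in a reachable state (every prime of a
-- window element was inserted when that element entered the window), so getD is exact there
def pvRemStep (st : PySem.Dict Int Int × Int) (pe : Int × Int) : PySem.Dict Int Int × Int :=
  let c := st.1.getD pe.1 0
  (st.1.insert pe.1 (c - pe.2), if 2 ≤ c ∧ c - pe.2 ≤ 1 then st.2 - 1 else st.2)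

def pvLoopB (fuel : Nat) (t : List Int) (n : Int) (cnt : PySem.Dict Int Int)
    (ov best left right : Int) : Int :=
  match fuel with
  | 0 => best
  | fuel + 1 =>
    if right < n then
      if ov = 0 then
        let st := (pvFactorize (PySem.List.pyGetD t right 0)).foldl pvAddStep (cnt, ov)
        let best' := if st.2 = 0 then right + 1 - left else best
        pvLoopB fuel t n st.1 st.2 best' left (right + 1)
      else
        let st := (pvFactorize (PySem.List.pyGetD t left 0)).foldl pvRemStep (cnt, ov)
        let best' := if st.2 = 0 then right - (left + 1) else best
        pvLoopB fuel t n st.1 st.2 best' (left + 1) right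
    else best

def longest_part_alt (t : List Int) : Int :=
  pvLoopB (2 * t.length + 1) t (t.length : Int) PySem.Dict.empty 0 0 0 0

-- ===== PRECONDITION & SPEC =====
-- product a * (a+1) * … * (a+n-1), in chunks so that kernel recursion stays shallow
def pvPF (a : Nat) : Nat → Nat
  | 0 => 1
  | n + 1 => (a + n) * pvPF a n

-- 1000! as a product of ten chunks; its prime divisors are exactly the primes ≤ 1000
def pvSmoothBase : Nat := pvPF 1 100 * pvPF 101 100 * pvPF 201 100 * pvPF 301 100 * pvPF 401 100 * pvPF 501 100 * pvPF 601 100 * pvPF 701 100 * pvPF 801 100 * pvPF 901 100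

-- Pre_ excludes exactly the inputs on which Python A does not return a value: an element ≤ 0 makes
-- the trial-division loop run forever, and an element with a prime factor > 1000 raises IndexError
-- on `factors[d]`. `x.toNat ∣ pvSmoothBase ^ (x.toNat.log2 + 1)` says exactly that x ≥ 1 is
-- 1000-smooth, for x of ANY size: every prime exponent of x is ≤ log2 x, and 1000! contains every
-- prime ≤ 1000, so a 1000-smooth x divides (1000!)^(log2 x + 1); conversely every prime divisor of
-- that power is ≤ 1000.
def Pre_longest_part (t : List Int) : Prop :=
  ∀ x ∈ t, 1 ≤ x ∧ x.toNat ∣ pvSmoothBase ^ (x.toNat.log2 + 1)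
instance (t : List Int) : Decidable (Pre_longest_part t) := by unfold Pre_longest_part; infer_instance

def pvWitness_longest_part : List Int := [2, 3, 10, 7, 1]

def Spec_longest_part (t : List Int) (out : Int) : Prop := out = longest_part_alt t
instance (t : List Int) (out : Int) : Decidable (Spec_longest_part t out) := by
  unfold Spec_longest_part; infer_instance

-- ===== CLAIM (what is proved, stated in full; the proofs are below) =====
def Claim_equal_longest_part : Prop :=
  ∀ (t : List Int), Dom_longest_part t → Pre_longest_part t → Spec_longest_part t (longest_part t)

-- ===== LEMMAS AND PROOFS =====

-- multiplicity of p in x (proof-side only)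
noncomputable def pvFacM (x : Int) (p : Nat) : Int := (x.toNat.factorization p : Int)

-- prime-multiplicity profile of the window t[left:right]
noncomputable def pvW (t : List Int) (l r : Int) (p : Nat) : Int :=
  ∑ i ∈ Finset.Ico l.toNat r.toNat, pvFacM (t.getD i 0) p

-- number of primes < 1001 whose multiplicity exceeds 1
noncomputable def pvOver (w : Nat → Int) : Int :=
  (((Finset.range 1001).filter (fun i => 2 ≤ w i)).card : Int)

-- the simulation invariant tying A's state (F) to B's state (cnt, ov)
def pvInv (t F : List Int) (cnt : PySem.Dict Int Int) (ov left right : Int) : Prop :=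
  0 ≤ left ∧ left ≤ right ∧ right ≤ t.length ∧ F.length = 1001 ∧
  (∀ p : Nat, p < 1001 → F.getD p 0 = pvW t left right p) ∧
  (∀ q : Int, cnt.getD q 0 = if 0 ≤ q ∧ q < 1001 then pvW t left right q.toNat else 0) ∧
  ov = pvOver (pvW t left right)

lemma pvPF_prime_le {p : Nat} (hp : p.Prime) :
    ∀ a n : Nat, p ∣ pvPF a n → ∃ i < n, p ∣ (a + i) := by
  intro a n
  induction n with
  | zero => intro h; simp [pvPF] at h; exact absurd h hp.one_lt.ne'
  | succ n ih =>
    intro h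
    rcases (Nat.Prime.dvd_mul hp).mp h with h' | h'
    · exact ⟨n, Nat.lt_succ_self n, h'⟩
    · obtain ⟨i, hi, hd⟩ := ih h'
      exact ⟨i, Nat.lt_succ_of_lt hi, hd⟩

lemma pvSmooth_of_dvd {x : Int} (hx : x.toNat ∣ pvSmoothBase ^ (x.toNat.log2 + 1)) :
    ∀ p : Nat, p.Prime → (p : Int) ∣ x → p ≤ 1000 := by
  intro p hp hpx
  have hpn : (p : Nat) ∣ x.toNat := by
    rcases le_or_gt 0 x with h0 | h0
    · have : ((x.toNat : Int)) = x := Int.toNat_of_nonneg h0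
      exact Int.natCast_dvd_natCast.mp (by rwa [this])
    · simp [Int.toNat_of_nonpos (le_of_lt h0)]
  have hpb : p ∣ pvSmoothBase ^ (x.toNat.log2 + 1) := hpn.trans hx
  have hpm : p ∣ pvSmoothBase := hp.dvd_of_dvd_pow hpb
  have step : ∀ a : Nat, 1 ≤ a → p ∣ pvPF a 100 → p ≤ a + 99 := by
    intro a ha1 ha
    obtain ⟨i, hi, hd⟩ := pvPF_prime_le hp a 100 ha
    have := Nat.le_of_dvd (by omega) hd
    omega
  unfold pvSmoothBase at hpm
  rcases (Nat.Prime.dvd_mul hp).mp hpm with h9 | hf10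
  · rcases (Nat.Prime.dvd_mul hp).mp h9 with h8 | hf9
    · rcases (Nat.Prime.dvd_mul hp).mp h8 with h7 | hf8
      · rcases (Nat.Prime.dvd_mul hp).mp h7 with h6 | hf7
        · rcases (Nat.Prime.dvd_mul hp).mp h6 with h5 | hf6
          · rcases (Nat.Prime.dvd_mul hp).mp h5 with h4 | hf5
            · rcases (Nat.Prime.dvd_mul hp).mp h4 with h3 | hf4
              · rcases (Nat.Prime.dvd_mul hp).mp h3 with h2 | hf3
                · rcases (Nat.Prime.dvd_mul hp).mp h2 with h1 | hf2
                  · have := step 1 (by omega) h1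
                    omega
                  · have := step 101 (by omega) hf2
                    omega
                · have := step 201 (by omega) hf3
                  omega
              · have := step 301 (by omega) hf4
                omega
            · have := step 401 (by omega) hf5
              omega
          · have := step 501 (by omega) hf6
            omega
        · have := step 601 (by omega) hf7
          omega
      · have := step 701 (by omega) hf8
        omega
    · have := step 801 (by omega) hf9
      omega
  · have := step 901 (by omega) hf10
    omega

lemma pvBumpA_length (F : List Int) (d delta : Int) : (pvBumpA F d delta).length = F.length := by
  unfold pvBumpA
  cases h : PySem.List.pyGet? F d <;> simp

lemma pvBumpA_getD (F : List Int) (d delta : Int) (hd : 0 ≤ d) (p : Nat) (hp : p < F.length) :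
    (pvBumpA F d delta).getD p 0 = F.getD p 0 + if (p : Int) = d then delta else 0 := by
  by_cases hlt : d.toNat < F.length
  · have hget : PySem.List.pyGet? F d = some (F.getD d.toNat 0) := by
      have hdlt : d < (F.length : Int) := by omega
      simp [PySem.List.pyGet?, PySem.List.pyIdx?, hd, hdlt, List.getD_eq_getElem?_getD,
        List.getElem?_eq_getElem hlt]
    unfold pvBumpA
    rw [hget]
    simp only [List.getD_eq_getElem?_getD, List.getElem?_set]
    by_cases hpe : (p : Int) = d
    · have : d.toNat = p := by omega
      simp [this, hp, hpe]
    · have : d.toNat ≠ p := by omega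
      simp [this, hpe]
  · have hget : PySem.List.pyGet? F d = none := by
      have hdge : ¬ d < (F.length : Int) := by omega
      simp [PySem.List.pyGet?, PySem.List.pyIdx?, hd, hdge]
    unfold pvBumpA
    rw [hget]
    have : (p : Int) ≠ d := by omega
    simp [this]

lemma pvFacInnerB_spec :
    ∀ (k fuel : Nat) (x d e : Int), 1 ≤ x → 2 ≤ d → (d ^ k ∣ x) → ¬ (d ^ (k + 1) ∣ x) →
      k ≤ fuel → pvFacInnerB fuel x d e = (x / d ^ k, e + k) := by
  intro k
  induction k with
  | zero =>
    intro fuel x d e hx hd _ hk1 _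
    have hnd : ¬ d ∣ x := by rwa [pow_one] at hk1
    have hmod : ¬ PySem.Int.mod x d = 0 := fun h => hnd ((PySem.Int.mod_eq_zero_iff_dvd x d).mp h)
    cases fuel with
    | zero => simp [pvFacInnerB]
    | succ fuel => simp [pvFacInnerB, hmod]
  | succ k ih =>
    intro fuel x d e hx hd hk hk1 hfuel
    have hdx : d ∣ x := (dvd_pow_self d (Nat.succ_ne_zero k)).trans hk
    obtain ⟨y, hy⟩ := hdx
    have hdpos : (0 : Int) < d := by omega
    have hy1 : 1 ≤ y := by nlinarith
    have hdvy : d ^ k ∣ y := by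
      have hk' := hk
      rw [hy, pow_succ'] at hk'
      exact (mul_dvd_mul_iff_left (by omega : (d : Int) ≠ 0)).mp hk'
    have hndvy : ¬ d ^ (k + 1) ∣ y := fun hcon =>
      hk1 (by rw [hy, pow_succ']; exact mul_dvd_mul_left d hcon)
    cases fuel with
    | zero => omega
    | succ fuel =>
      have hmod : PySem.Int.mod x d = 0 := (PySem.Int.mod_eq_zero_iff_dvd x d).mpr ⟨y, hy⟩
      have hdiv : PySem.Int.floordiv x d = y := by
        rw [PySem.Int.floordiv_eq_ediv_of_pos hdpos, hy, Int.mul_ediv_cancel_left _ (by omega)]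
      simp only [pvFacInnerB, hmod, if_pos rfl, hdiv]
      rw [ih fuel y d (e + 1) hy1 hd hdvy hndvy (by omega)]
      have hq : y / d ^ k = x / d ^ (k + 1) := by
        rw [hy, pow_succ', Int.mul_ediv_mul_of_pos _ _ hdpos]
      rw [hq]
      simp only [if_true]
      congr 1
      push_cast
      ring

lemma pvFacInnerA_spec :
    ∀ (k fuel : Nat) (x d delta : Int) (F : List Int), 1 ≤ x → 2 ≤ d → (d ^ k ∣ x) →
      ¬ (d ^ (k + 1) ∣ x) → k ≤ fuel →
      (pvFacInnerA fuel x d delta F).1 = x / d ^ k ∧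
      (pvFacInnerA fuel x d delta F).2.length = F.length ∧
      (∀ p : Nat, p < F.length →
        (pvFacInnerA fuel x d delta F).2.getD p 0 =
          F.getD p 0 + if (p : Int) = d then delta * k else 0) := by
  intro k
  induction k with
  | zero =>
    intro fuel x d delta F hx hd _ hk1 _
    have hnd : ¬ d ∣ x := by rwa [pow_one] at hk1
    have hmod : ¬ PySem.Int.mod x d = 0 := fun h => hnd ((PySem.Int.mod_eq_zero_iff_dvd x d).mp h)
    cases fuel with
    | zero => refine ⟨by simp [pvFacInnerA], by simp [pvFacInnerA], ?_⟩
              intro p hp; simp [pvFacInnerA]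
    | succ fuel => refine ⟨by simp [pvFacInnerA, hmod], by simp [pvFacInnerA, hmod], ?_⟩
                   intro p hp; simp [pvFacInnerA, hmod]
  | succ k ih =>
    intro fuel x d delta F hx hd hk hk1 hfuel
    have hdx : d ∣ x := (dvd_pow_self d (Nat.succ_ne_zero k)).trans hk
    obtain ⟨y, hy⟩ := hdx
    have hdpos : (0 : Int) < d := by omega
    have hy1 : 1 ≤ y := by nlinarith
    have hdvy : d ^ k ∣ y := by
      have hk' := hk
      rw [hy, pow_succ'] at hk'
      exact (mul_dvd_mul_iff_left (by omega : (d : Int) ≠ 0)).mp hk'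
    have hndvy : ¬ d ^ (k + 1) ∣ y := fun hcon =>
      hk1 (by rw [hy, pow_succ']; exact mul_dvd_mul_left d hcon)
    cases fuel with
    | zero => omega
    | succ fuel =>
      have hmod : PySem.Int.mod x d = 0 := (PySem.Int.mod_eq_zero_iff_dvd x d).mpr ⟨y, hy⟩
      have hdiv : PySem.Int.floordiv x d = y := by
        rw [PySem.Int.floordiv_eq_ediv_of_pos hdpos, hy, Int.mul_ediv_cancel_left _ (by omega)]
      have hq : y / d ^ k = x / d ^ (k + 1) := by
        rw [hy, pow_succ', Int.mul_ediv_mul_of_pos _ _ hdpos]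
      obtain ⟨ih1, ih2, ih3⟩ :=
        ih fuel y d delta (pvBumpA F d delta) hy1 hd hdvy hndvy (by omega)
      simp only [pvFacInnerA, hmod, if_true, hdiv]
      refine ⟨by rw [ih1, hq], by rw [ih2, pvBumpA_length], ?_⟩
      intro p hp
      rw [ih3 p (by rw [pvBumpA_length]; exact hp),
        pvBumpA_getD F d delta (by omega) p hp]
      by_cases hpe : (p : Int) = d <;> simp [hpe] <;> push_cast <;> ring

lemma pvNatMultExists : ∀ x : Nat, ∀ d : Nat, 1 ≤ x → 2 ≤ d →
    ∃ k : Nat, (d ^ k ∣ x) ∧ ¬ (d ^ (k + 1) ∣ x) := by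
  intro x
  induction x using Nat.strong_induction_on with
  | _ x ihx =>
    intro d hx hd
    by_cases hdx : d ∣ x
    · obtain ⟨y, hy⟩ := hdx
      have hy1 : 1 ≤ y := by
        rcases Nat.eq_zero_or_pos y with h | h
        · subst h; simp at hy; omega
        · exact h
      have hylt : y < x := by
        subst hy; nlinarith
      obtain ⟨k, hk, hk1⟩ := ihx y hylt d hy1 hd
      refine ⟨k + 1, ?_, ?_⟩
      · rw [hy, pow_succ']; exact mul_dvd_mul_left d hk
      · intro hcon
        rw [hy, pow_succ'] at hcon
        exact hk1 ((Nat.mul_dvd_mul_iff_left (by omega : 0 < d)).mp hcon)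
    · exact ⟨0, by simp, by rwa [zero_add, pow_one]⟩

lemma pvPowBound : ∀ (d k : Nat), 2 ≤ d → 1 ≤ k → d + k ≤ d ^ k + 1 := by
  intro d k hd hk
  induction k with
  | zero => omega
  | succ k ih =>
    rcases Nat.eq_zero_or_pos k with h | h
    · subst h; simp
    · have h1 := ih h
      have h2 : 2 ≤ d ^ k := by
        calc 2 = 2 ^ 1 := by norm_num
        _ ≤ 2 ^ k := Nat.pow_le_pow_right (by omega) h
        _ ≤ d ^ k := Nat.pow_le_pow_left hd k
      have h3 : d ^ (k + 1) = d ^ k * d := pow_succ d k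
      nlinarith

lemma pvMultExists (x d : Int) (hx : 1 ≤ x) (hd : 2 ≤ d) :
    ∃ k : Nat, (d ^ k ∣ x) ∧ ¬ (d ^ (k + 1) ∣ x) ∧ (1 ≤ k → (k : Int) + d ≤ x + 1) := by
  obtain ⟨k, hk, hk1⟩ := pvNatMultExists x.toNat d.toNat (by omega) (by omega)
  have hxe : ((x.toNat : Int)) = x := Int.toNat_of_nonneg (by omega)
  have hde : ((d.toNat : Int)) = d := Int.toNat_of_nonneg (by omega)
  refine ⟨k, ?_, ?_, ?_⟩
  · have := Int.natCast_dvd_natCast.mpr hk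
    push_cast at this
    rwa [hxe, hde] at this
  · intro hcon
    apply hk1
    have : ((d.toNat : Int)) ^ (k + 1) ∣ ((x.toNat : Int)) := by rwa [hxe, hde]
    exact_mod_cast this
  · intro hk0
    have hdk : d.toNat ^ k ≤ x.toNat := Nat.le_of_dvd (by omega) hk
    have := pvPowBound d.toNat k (by omega) hk0
    omega

lemma pvFacM_one (p : Nat) : pvFacM 1 p = 0 := by
  simp [pvFacM]

-- x = d^k * y with d prime (seen through toNat): multiplicity of p in x splits
lemma pvFacM_split (x y d : Int) (k : Nat) (hd : 2 ≤ d) (hy : 1 ≤ y)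
    (hp : d.toNat.Prime) (hxy : x = d ^ k * y) (p : Nat) :
    pvFacM x p = pvFacM y p + if (p : Int) = d then (k : Int) else 0 := by
  have hX : x.toNat = d.toNat ^ k * y.toNat := by
    have hd0 : ((d.toNat : Int)) = d := Int.toNat_of_nonneg (by omega)
    have hy0 : ((y.toNat : Int)) = y := Int.toNat_of_nonneg (by omega)
    have : x = ((d.toNat ^ k * y.toNat : Nat) : Int) := by
      push_cast
      rw [hd0, hy0, hxy]
    rw [this, Int.toNat_natCast]
  unfold pvFacM
  rw [hX, Nat.factorization_mul (pow_ne_zero k hp.ne_zero) (by omega),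
    Nat.Prime.factorization_pow hp]
  rw [Finsupp.add_apply]
  by_cases hpe : (p : Int) = d
  · have hdp : d.toNat = p := by omega
    simp only [Finsupp.single_apply, hdp, if_pos rfl, if_pos hpe]
    push_cast
    ring
  · have hdp : d.toNat ≠ p := by omega
    simp [Finsupp.single_apply, hdp, hpe]

lemma pvFacLoopA_spec :
    ∀ (fuel : Nat) (x d delta : Int) (F : List Int), 1 ≤ x → 2 ≤ d →
      (∀ e : Int, 2 ≤ e → e < d → ¬ e ∣ x) → x + 2 - d ≤ (fuel : Int) →
      (pvFacLoopA fuel x d delta F).length = F.length ∧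
      (∀ p : Nat, p < F.length →
        (pvFacLoopA fuel x d delta F).getD p 0 = F.getD p 0 + delta * pvFacM x p) := by
  intro fuel
  induction fuel with
  | zero =>
    intro x d delta F hx hd hnd hfl
    have hx1 : x = 1 := by
      by_contra hcon
      exact hnd x (by omega) (by push_cast at hfl; omega) dvd_rfl
    subst hx1
    exact ⟨rfl, fun p _ => by simp [pvFacLoopA, pvFacM_one]⟩
  | succ fuel ih =>
    intro x d delta F hx hd hnd hfl
    by_cases hx1 : x = 1
    · subst hx1
      exact ⟨by simp [pvFacLoopA], fun p _ => by simp [pvFacLoopA, pvFacM_one]⟩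
    · obtain ⟨k, hk, hk1, hkb⟩ := pvMultExists x d hx hd
      have hkfuel : k ≤ fuel := by
        rcases Nat.eq_zero_or_pos k with h | h
        · omega
        · have := hkb h
          push_cast at hfl
          omega
      obtain ⟨hin1, hin2, hin3⟩ := pvFacInnerA_spec k fuel x d delta F hx hd hk hk1 hkfuel
      obtain ⟨y, hy⟩ := hk
      have hpow : (0 : Int) < d ^ k := pow_pos (by omega) k
      have hy1 : 1 ≤ y := by nlinarith
      have hxy : x / d ^ k = y := by
        rw [hy, Int.mul_ediv_cancel_left _ (by omega)]
      have hndy : ∀ e : Int, 2 ≤ e → e < d + 1 → ¬ e ∣ y := by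
        intro e he1 he2 hecon
        by_cases hed : e = d
        · subst hed
          obtain ⟨z, hz⟩ := hecon
          exact hk1 ⟨z, by rw [hy, hz, pow_succ]; ring⟩
        · exact hnd e he1 (by omega) (hecon.trans ⟨d ^ k, by rw [hy]; ring⟩)
      have hstep : ∀ p : Nat, pvFacM x p = pvFacM y p + if (p : Int) = d then (k : Int) else 0 := by
        rcases Nat.eq_zero_or_pos k with hk0 | hk0
        · subst hk0
          have hyx : y = x := by rw [hy]; ring
          intro p
          simp [hyx]
        · -- k ≥ 1 forces d prime: a proper divisor of d would divide x below d
          have hdp : d.toNat.Prime := by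
            rw [Nat.prime_def_lt]
            constructor
            · omega
            · intro m hm hmd
              by_contra hm1
              have hm2 : 2 ≤ m := by
                rcases Nat.eq_zero_or_pos m with h | h
                · subst h
                  have := Nat.eq_zero_of_zero_dvd hmd
                  omega
                · omega
              have hmx : (m : Int) ∣ x := by
                have h1 : (m : Int) ∣ d := by
                  have := Int.natCast_dvd_natCast.mpr hmd
                  rwa [Int.toNat_of_nonneg (by omega : (0:Int) ≤ d)] at this
                exact h1.trans ((dvd_pow_self d (by omega : k ≠ 0)).trans ⟨y, hy⟩)
              exact hnd m (by push_cast; omega) (by push_cast; omega) hmx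
          exact pvFacM_split x y d k hd hy1 hdp hy
      have hylt : y + 2 - (d + 1) ≤ (fuel : Int) := by
        rcases Nat.eq_zero_or_pos k with hk0 | hk0
        · subst hk0
          have : y = x := by rw [hy]; ring
          push_cast at hfl
          omega
        · have hd2 : 2 ≤ d ^ k := by
            calc (2:Int) ≤ d := hd
            _ = d ^ 1 := (pow_one d).symm
            _ ≤ d ^ k := pow_le_pow_right₀ (by omega) hk0
          have : 2 * y ≤ x := by nlinarith
          push_cast at hfl
          omega
      obtain ⟨ihl, ihe⟩ :=
        ih y (d + 1) delta (pvFacInnerA fuel x d delta F).2 hy1 (by omega) hndy hylt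
      constructor
      · simp only [pvFacLoopA, if_neg hx1]
        rw [hin1, hxy, ihl, hin2]
      · intro p hp
        simp only [pvFacLoopA, if_neg hx1]
        rw [hin1, hxy, ihe p (by rw [hin2]; exact hp), hin3 p hp, hstep p]
        by_cases hpe : (p : Int) = d <;> simp [hpe] <;> ring

lemma pvFacLoopB_acc (fuel : Nat) :
    ∀ (x d : Int) (acc : List (Int × Int)),
      pvFacLoopB fuel x d acc = acc ++ pvFacLoopB fuel x d [] := by
  induction fuel with
  | zero => intro x d acc; simp [pvFacLoopB]
  | succ fuel ih =>
    intro x d acc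
    by_cases hx : x = 1
    · simp [pvFacLoopB, hx]
    · simp only [pvFacLoopB, if_neg hx]
      by_cases he : (pvFacInnerB fuel x d 0).2 ≠ 0
      · simp only [if_pos he]
        rw [ih _ _ (acc ++ [(d, (pvFacInnerB fuel x d 0).2)]),
          ih _ _ ([] ++ [(d, (pvFacInnerB fuel x d 0).2)])]
        simp
      · simp only [if_neg he]
        rw [ih _ _ acc]

lemma pvOver_update (c : Nat → Int) (j : Nat) (v : Int) (hj : j < 1001) :
    pvOver (fun q => if q = j then v else c q) =
      pvOver c + (if 2 ≤ v then 1 else 0) - (if 2 ≤ c j then 1 else 0) := by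
  have hj' : j ∈ Finset.range 1001 := Finset.mem_range.mpr hj
  have hS : Finset.range 1001 = insert j ((Finset.range 1001).erase j) :=
    (Finset.insert_erase hj').symm
  have hcongr : ∀ (P : Nat → Int),
      ((Finset.range 1001).erase j).filter (fun q => 2 ≤ (if q = j then v else c q)) =
        ((Finset.range 1001).erase j).filter (fun q => 2 ≤ c q) := by
    intro _
    apply Finset.filter_congr
    intro i hi
    have : i ≠ j := (Finset.mem_erase.mp hi).1
    simp [this]
  have hnm : j ∉ (Finset.range 1001).erase j := Finset.notMem_erase j _
  unfold pvOver
  rw [hS, Finset.filter_insert, Finset.filter_insert, hcongr c]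
  by_cases h1 : 2 ≤ v <;> by_cases h2 : 2 ≤ c j <;>
    simp only [h1, h2, if_true, if_false, if_pos, if_neg, not_false_iff] <;>
    first
    | (rw [Finset.card_insert_of_notMem (fun h => hnm (Finset.mem_of_mem_filter j h)),
        Finset.card_insert_of_notMem (fun h => hnm (Finset.mem_of_mem_filter j h))]; push_cast; ring)
    | (try rw [Finset.card_insert_of_notMem (fun h => hnm (Finset.mem_of_mem_filter j h))]) <;>
      push_cast <;> ring

lemma pvDPrime (x d : Int) (hx : 1 ≤ x) (hd : 2 ≤ d)
    (hnd : ∀ e : Int, 2 ≤ e → e < d → ¬ e ∣ x) (hdx : d ∣ x) : d.toNat.Prime := by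
  rw [Nat.prime_def_lt]
  constructor
  · omega
  · intro m hm hmd
    by_contra hm1
    have hm2 : 2 ≤ m := by
      rcases Nat.eq_zero_or_pos m with h | h
      · subst h
        have := Nat.eq_zero_of_zero_dvd hmd
        omega
      · omega
    have hmx : (m : Int) ∣ x := by
      have h1 : (m : Int) ∣ d := by
        have := Int.natCast_dvd_natCast.mpr hmd
        rwa [Int.toNat_of_nonneg (by omega : (0:Int) ≤ d)] at this
      exact h1.trans hdx
    exact hnd m (by push_cast; omega) (by push_cast; omega) hmx

lemma pvFoldB_add :
    ∀ (fuel : Nat) (x d : Int) (cnt : PySem.Dict Int Int) (ov : Int) (c : Nat → Int),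
      1 ≤ x → 2 ≤ d → (∀ e : Int, 2 ≤ e → e < d → ¬ e ∣ x) → x + 2 - d ≤ (fuel : Int) →
      (∀ p : Nat, p.Prime → (p : Int) ∣ x → p ≤ 1000) →
      (∀ q : Int, cnt.getD q 0 = if 0 ≤ q ∧ q < 1001 then c q.toNat else 0) →
      ov = pvOver c →
      (∀ q : Int, ((pvFacLoopB fuel x d []).foldl pvAddStep (cnt, ov)).1.getD q 0 =
          if 0 ≤ q ∧ q < 1001 then c q.toNat + pvFacM x q.toNat else 0) ∧
      ((pvFacLoopB fuel x d []).foldl pvAddStep (cnt, ov)).2 =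
        pvOver (fun p => c p + pvFacM x p) := by
  intro fuel
  induction fuel with
  | zero =>
    intro x d cnt ov c hx hd hnd hfl _ hrel hov
    have hx1 : x = 1 := by
      by_contra hcon
      exact hnd x (by omega) (by push_cast at hfl; omega) dvd_rfl
    subst hx1
    have hc : (fun p => c p + pvFacM 1 p) = c := by
      funext p
      simp [pvFacM_one]
    refine ⟨fun q => ?_, by simpa [pvFacLoopB, hc] using hov⟩
    simpa [pvFacLoopB, pvFacM_one] using hrel q
  | succ fuel ih =>
    intro x d cnt ov c hx hd hnd hfl hsm hrel hov
    by_cases hx1 : x = 1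
    · subst hx1
      have hc : (fun p => c p + pvFacM 1 p) = c := by
        funext p
        simp [pvFacM_one]
      refine ⟨fun q => ?_, by simpa [pvFacLoopB, hc] using hov⟩
      simpa [pvFacLoopB, pvFacM_one] using hrel q
    · obtain ⟨k, hk, hk1, hkb⟩ := pvMultExists x d hx hd
      have hkfuel : k ≤ fuel := by
        rcases Nat.eq_zero_or_pos k with h | h
        · omega
        · have := hkb h
          push_cast at hfl
          omega
      have hinner : pvFacInnerB fuel x d 0 = (x / d ^ k, (k : Int)) := by
        rw [pvFacInnerB_spec k fuel x d 0 hx hd hk hk1 hkfuel, zero_add]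
      obtain ⟨y, hy⟩ := hk
      have hpow : (0 : Int) < d ^ k := pow_pos (by omega) k
      have hy1 : 1 ≤ y := by nlinarith
      have hxy : x / d ^ k = y := by
        rw [hy, Int.mul_ediv_cancel_left _ (by omega)]
      have hndy : ∀ e : Int, 2 ≤ e → e < d + 1 → ¬ e ∣ y := by
        intro e he1 he2 hecon
        by_cases hed : e = d
        · subst hed
          obtain ⟨z, hz⟩ := hecon
          exact hk1 ⟨z, by rw [hy, hz, pow_succ]; ring⟩
        · exact hnd e he1 (by omega) (hecon.trans ⟨d ^ k, by rw [hy]; ring⟩)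
      have hsmy : ∀ p : Nat, p.Prime → (p : Int) ∣ y → p ≤ 1000 :=
        fun p hp hpy => hsm p hp (hpy.trans ⟨d ^ k, by rw [hy]; ring⟩)
      have hylt : y + 2 - (d + 1) ≤ (fuel : Int) := by
        rcases Nat.eq_zero_or_pos k with hk0 | hk0
        · subst hk0
          have : y = x := by rw [hy]; ring
          push_cast at hfl
          omega
        · have hd2 : 2 ≤ d ^ k := by
            calc (2:Int) ≤ d := hd
            _ = d ^ 1 := (pow_one d).symm
            _ ≤ d ^ k := pow_le_pow_right₀ (by omega) hk0
          have : 2 * y ≤ x := by nlinarith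
          push_cast at hfl
          omega
      rcases Nat.eq_zero_or_pos k with hk0 | hk0
      · -- d does not divide x: nothing is appended for d
        subst hk0
        have hyx : y = x := by rw [hy]; ring
        have hlist : pvFacLoopB (fuel + 1) x d [] = pvFacLoopB fuel x (d + 1) [] := by
          simp [pvFacLoopB, hx1, hinner, hxy, hyx]
        rw [hlist]
        exact ih x (d + 1) cnt ov c hx (by omega) (by rw [← hyx]; exact hndy)
          (by rw [hyx] at hylt; exact hylt) hsm hrel hov
      · -- d is a prime factor with multiplicity k ≥ 1
        have hdp : d.toNat.Prime :=
          pvDPrime x d hx hd hnd ((dvd_pow_self d (by omega : k ≠ 0)).trans ⟨y, hy⟩)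
        have hdle : d ≤ 1000 := by
          have := hsm d.toNat hdp
            (by rw [Int.toNat_of_nonneg (by omega : (0:Int) ≤ d)]
                exact (dvd_pow_self d (by omega : k ≠ 0)).trans ⟨y, hy⟩)
          omega
        have hstep : ∀ p : Nat,
            pvFacM x p = pvFacM y p + if (p : Int) = d then (k : Int) else 0 :=
          pvFacM_split x y d k hd hy1 hdp hy
        have hlist : pvFacLoopB (fuel + 1) x d [] =
            (d, (k : Int)) :: pvFacLoopB fuel y (d + 1) [] := by
          have hkne : ((k : Int)) ≠ 0 := by push_cast; omega
          simp only [pvFacLoopB, if_neg hx1, hinner, hxy, hkne, ne_eq,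
            not_false_iff, if_pos, List.nil_append]
          rw [pvFacLoopB_acc]
          simp
        set c0 : Int := c d.toNat with hc0
        have hcd : cnt.getD d 0 = c0 := by
          rw [hrel d, if_pos ⟨by omega, by omega⟩]
        set c1 : Nat → Int := fun q => if q = d.toNat then c d.toNat + (k : Int) else c q
          with hc1
        have hrel1 : ∀ q : Int, (cnt.insert d (c0 + (k : Int))).getD q 0 =
            if 0 ≤ q ∧ q < 1001 then c1 q.toNat else 0 := by
          intro q
          rw [PySem.Dict.getD_insert]
          by_cases hq : q = d
          · subst hq
            rw [if_pos rfl, if_pos ⟨by omega, by omega⟩, hc1]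
            simp [hc0]
          · rw [if_neg hq, hrel q]
            by_cases hq2 : 0 ≤ q ∧ q < 1001
            · rw [if_pos hq2, if_pos hq2, hc1]
              have : q.toNat ≠ d.toNat := by omega
              simp [this]
            · rw [if_neg hq2, if_neg hq2]
        have hov1 : (if c0 ≤ 1 ∧ 2 ≤ c0 + (k : Int) then ov + 1 else ov) = pvOver c1 := by
          rw [hc1, pvOver_update c d.toNat (c d.toNat + (k : Int)) (by omega), ← hc0, hov]
          have hkpos : (1 : Int) ≤ (k : Int) := by push_cast; omega
          split_ifs <;> omega
        have hmain := ih y (d + 1) (cnt.insert d (c0 + (k : Int)))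
          (if c0 ≤ 1 ∧ 2 ≤ c0 + (k : Int) then ov + 1 else ov) c1 hy1 (by omega)
          hndy hylt hsmy hrel1 hov1
        have hfold : (pvFacLoopB (fuel + 1) x d []).foldl pvAddStep (cnt, ov) =
            (pvFacLoopB fuel y (d + 1) []).foldl pvAddStep
              (cnt.insert d (c0 + (k : Int)),
               if c0 ≤ 1 ∧ 2 ≤ c0 + (k : Int) then ov + 1 else ov) := by
          rw [hlist, List.foldl_cons]
          simp [pvAddStep, hcd]
        have hcomb : ∀ p : Nat, c1 p + pvFacM y p = c p + pvFacM x p := by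
          intro p
          rw [hstep p]
          by_cases hpe : p = d.toNat
          · have h1 : c1 p = c d.toNat + (k : Int) := by rw [hc1]; simp [hpe]
            rw [h1, if_pos (show ((p : Int)) = d by omega), hpe]
            ring
          · have h1 : c1 p = c p := by rw [hc1]; simp [hpe]
            rw [h1, if_neg (show ¬ ((p : Int) = d) by omega)]
            ring
        rw [hfold]
        refine ⟨fun q => ?_, ?_⟩
        · rw [hmain.1 q]
          by_cases hq2 : 0 ≤ q ∧ q < 1001
          · rw [if_pos hq2, if_pos hq2, hcomb q.toNat]
          · rw [if_neg hq2, if_neg hq2]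
        · rw [hmain.2]
          congr 1
          funext p
          exact hcomb p

lemma pvFoldB_rem :
    ∀ (fuel : Nat) (x d : Int) (cnt : PySem.Dict Int Int) (ov : Int) (c : Nat → Int),
      1 ≤ x → 2 ≤ d → (∀ e : Int, 2 ≤ e → e < d → ¬ e ∣ x) → x + 2 - d ≤ (fuel : Int) →
      (∀ p : Nat, p.Prime → (p : Int) ∣ x → p ≤ 1000) →
      (∀ q : Int, cnt.getD q 0 = if 0 ≤ q ∧ q < 1001 then c q.toNat else 0) →
      ov = pvOver c →
      (∀ q : Int, ((pvFacLoopB fuel x d []).foldl pvRemStep (cnt, ov)).1.getD q 0 =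
          if 0 ≤ q ∧ q < 1001 then c q.toNat - pvFacM x q.toNat else 0) ∧
      ((pvFacLoopB fuel x d []).foldl pvRemStep (cnt, ov)).2 =
        pvOver (fun p => c p - pvFacM x p) := by
  intro fuel
  induction fuel with
  | zero =>
    intro x d cnt ov c hx hd hnd hfl _ hrel hov
    have hx1 : x = 1 := by
      by_contra hcon
      exact hnd x (by omega) (by push_cast at hfl; omega) dvd_rfl
    subst hx1
    have hc : (fun p => c p - pvFacM 1 p) = c := by
      funext p
      simp [pvFacM_one]
    refine ⟨fun q => ?_, by simpa [pvFacLoopB, hc] using hov⟩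
    simpa [pvFacLoopB, pvFacM_one] using hrel q
  | succ fuel ih =>
    intro x d cnt ov c hx hd hnd hfl hsm hrel hov
    by_cases hx1 : x = 1
    · subst hx1
      have hc : (fun p => c p - pvFacM 1 p) = c := by
        funext p
        simp [pvFacM_one]
      refine ⟨fun q => ?_, by simpa [pvFacLoopB, hc] using hov⟩
      simpa [pvFacLoopB, pvFacM_one] using hrel q
    · obtain ⟨k, hk, hk1, hkb⟩ := pvMultExists x d hx hd
      have hkfuel : k ≤ fuel := by
        rcases Nat.eq_zero_or_pos k with h | h
        · omega
        · have := hkb h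
          push_cast at hfl
          omega
      have hinner : pvFacInnerB fuel x d 0 = (x / d ^ k, (k : Int)) := by
        rw [pvFacInnerB_spec k fuel x d 0 hx hd hk hk1 hkfuel, zero_add]
      obtain ⟨y, hy⟩ := hk
      have hpow : (0 : Int) < d ^ k := pow_pos (by omega) k
      have hy1 : 1 ≤ y := by nlinarith
      have hxy : x / d ^ k = y := by
        rw [hy, Int.mul_ediv_cancel_left _ (by omega)]
      have hndy : ∀ e : Int, 2 ≤ e → e < d + 1 → ¬ e ∣ y := by
        intro e he1 he2 hecon
        by_cases hed : e = d
        · subst hed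
          obtain ⟨z, hz⟩ := hecon
          exact hk1 ⟨z, by rw [hy, hz, pow_succ]; ring⟩
        · exact hnd e he1 (by omega) (hecon.trans ⟨d ^ k, by rw [hy]; ring⟩)
      have hsmy : ∀ p : Nat, p.Prime → (p : Int) ∣ y → p ≤ 1000 :=
        fun p hp hpy => hsm p hp (hpy.trans ⟨d ^ k, by rw [hy]; ring⟩)
      have hylt : y + 2 - (d + 1) ≤ (fuel : Int) := by
        rcases Nat.eq_zero_or_pos k with hk0 | hk0
        · subst hk0
          have : y = x := by rw [hy]; ring
          push_cast at hfl
          omega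
        · have hd2 : 2 ≤ d ^ k := by
            calc (2:Int) ≤ d := hd
            _ = d ^ 1 := (pow_one d).symm
            _ ≤ d ^ k := pow_le_pow_right₀ (by omega) hk0
          have : 2 * y ≤ x := by nlinarith
          push_cast at hfl
          omega
      rcases Nat.eq_zero_or_pos k with hk0 | hk0
      · subst hk0
        have hyx : y = x := by rw [hy]; ring
        have hlist : pvFacLoopB (fuel + 1) x d [] = pvFacLoopB fuel x (d + 1) [] := by
          simp [pvFacLoopB, hx1, hinner, hxy, hyx]
        rw [hlist]
        exact ih x (d + 1) cnt ov c hx (by omega) (by rw [← hyx]; exact hndy)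
          (by rw [hyx] at hylt; exact hylt) hsm hrel hov
      · have hdp : d.toNat.Prime :=
          pvDPrime x d hx hd hnd ((dvd_pow_self d (by omega : k ≠ 0)).trans ⟨y, hy⟩)
        have hdle : d ≤ 1000 := by
          have := hsm d.toNat hdp
            (by rw [Int.toNat_of_nonneg (by omega : (0:Int) ≤ d)]
                exact (dvd_pow_self d (by omega : k ≠ 0)).trans ⟨y, hy⟩)
          omega
        have hstep : ∀ p : Nat,
            pvFacM x p = pvFacM y p + if (p : Int) = d then (k : Int) else 0 :=
          pvFacM_split x y d k hd hy1 hdp hy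
        have hlist : pvFacLoopB (fuel + 1) x d [] =
            (d, (k : Int)) :: pvFacLoopB fuel y (d + 1) [] := by
          have hkne : ((k : Int)) ≠ 0 := by push_cast; omega
          simp only [pvFacLoopB, if_neg hx1, hinner, hxy, hkne, ne_eq,
            not_false_iff, if_pos, List.nil_append]
          rw [pvFacLoopB_acc]
          simp
        set c0 : Int := c d.toNat with hc0
        have hcd : cnt.getD d 0 = c0 := by
          rw [hrel d, if_pos ⟨by omega, by omega⟩]
        set c1 : Nat → Int := fun q => if q = d.toNat then c d.toNat - (k : Int) else c q
          with hc1
        have hrel1 : ∀ q : Int, (cnt.insert d (c0 - (k : Int))).getD q 0 =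
            if 0 ≤ q ∧ q < 1001 then c1 q.toNat else 0 := by
          intro q
          rw [PySem.Dict.getD_insert]
          by_cases hq : q = d
          · subst hq
            rw [if_pos rfl, if_pos ⟨by omega, by omega⟩, hc1]
            simp [hc0]
          · rw [if_neg hq, hrel q]
            by_cases hq2 : 0 ≤ q ∧ q < 1001
            · rw [if_pos hq2, if_pos hq2, hc1]
              have : q.toNat ≠ d.toNat := by omega
              simp [this]
            · rw [if_neg hq2, if_neg hq2]
        have hov1 : (if 2 ≤ c0 ∧ c0 - (k : Int) ≤ 1 then ov - 1 else ov) = pvOver c1 := by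
          rw [hc1, pvOver_update c d.toNat (c d.toNat - (k : Int)) (by omega), ← hc0, hov]
          have hkpos : (1 : Int) ≤ (k : Int) := by push_cast; omega
          split_ifs <;> omega
        have hmain := ih y (d + 1) (cnt.insert d (c0 - (k : Int)))
          (if 2 ≤ c0 ∧ c0 - (k : Int) ≤ 1 then ov - 1 else ov) c1 hy1 (by omega)
          hndy hylt hsmy hrel1 hov1
        have hfold : (pvFacLoopB (fuel + 1) x d []).foldl pvRemStep (cnt, ov) =
            (pvFacLoopB fuel y (d + 1) []).foldl pvRemStep
              (cnt.insert d (c0 - (k : Int)),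
               if 2 ≤ c0 ∧ c0 - (k : Int) ≤ 1 then ov - 1 else ov) := by
          rw [hlist, List.foldl_cons]
          simp [pvRemStep, hcd]
        have hcomb : ∀ p : Nat, c1 p - pvFacM y p = c p - pvFacM x p := by
          intro p
          rw [hstep p]
          by_cases hpe : p = d.toNat
          · have h1 : c1 p = c d.toNat - (k : Int) := by rw [hc1]; simp [hpe]
            rw [h1, if_pos (show ((p : Int)) = d by omega), hpe]
            ring
          · have h1 : c1 p = c p := by rw [hc1]; simp [hpe]
            rw [h1, if_neg (show ¬ ((p : Int) = d) by omega)]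
            ring
        rw [hfold]
        refine ⟨fun q => ?_, ?_⟩
        · rw [hmain.1 q]
          by_cases hq2 : 0 ≤ q ∧ q < 1001
          · rw [if_pos hq2, if_pos hq2, hcomb q.toNat]
          · rw [if_neg hq2, if_neg hq2]
        · rw [hmain.2]
          congr 1
          funext p
          exact hcomb p

lemma pvMax_iff (F : List Int) (w : Nat → Int) (hL : F.length = 1001)
    (hF : ∀ p : Nat, p < 1001 → F.getD p 0 = w p) :
    ((PySem.List.max? F (fun y => y)).getD 0 ≤ 1) ↔ pvOver w = 0 := by
  have hne : F ≠ [] := by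
    intro h
    rw [h] at hL
    simp at hL
  have hover : pvOver w = 0 ↔ ∀ p : Nat, p < 1001 → w p ≤ 1 := by
    unfold pvOver
    rw [Nat.cast_eq_zero, Finset.card_eq_zero, Finset.filter_eq_empty_iff]
    constructor
    · intro h p hp
      have := h (Finset.mem_range.mpr hp)
      omega
    · intro h p hp
      have := h p (Finset.mem_range.mp hp)
      omega
  cases hm : PySem.List.max? F (fun y => y) with
  | none => exact absurd ((PySem.List.max?_eq_none_iff F fun y => y).mp hm) hne
  | some m =>
    have hmem : m ∈ F := PySem.List.max?_mem hm
    have hmax : ∀ y ∈ F, y ≤ m := fun y hy => PySem.List.max?_isMax hm y hy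
    simp only [Option.getD_some]
    rw [hover]
    constructor
    · intro h1 p hp
      have hpF : p < F.length := by omega
      rw [← hF p hp, List.getD_eq_getElem F 0 hpF]
      exact le_trans (hmax _ (List.getElem_mem hpF)) h1
    · intro h1
      obtain ⟨i, hi, hie⟩ := List.mem_iff_getElem.mp hmem
      have : F.getD i 0 = m := by rw [List.getD_eq_getElem F 0 hi, hie]
      rw [← this, hF i (by omega)]
      exact h1 i (by omega)

lemma pvWindow_pos (t : List Int) (l r : Int) (h : pvOver (pvW t l r) ≠ 0) :
    l.toNat < r.toNat := by
  by_contra hcon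
  apply h
  have hW : ∀ p : Nat, pvW t l r p = 0 := by
    intro p
    unfold pvW
    rw [Finset.Ico_eq_empty (by omega)]
    simp
  unfold pvOver
  rw [Nat.cast_eq_zero, Finset.card_eq_zero, Finset.filter_eq_empty_iff]
  intro p _
  rw [hW p]
  omega

lemma pvW_succ_top (t : List Int) (l r : Int) (hl : 0 ≤ l) (hlr : l ≤ r) (p : Nat) :
    pvW t l (r + 1) p = pvW t l r p + pvFacM (t.getD r.toNat 0) p := by
  unfold pvW
  have h1 : (r + 1).toNat = r.toNat + 1 := by omega
  have h2 : l.toNat ≤ r.toNat := by omega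
  rw [h1, Finset.sum_Ico_succ_top h2]

lemma pvW_succ_bot (t : List Int) (l r : Int) (hl : 0 ≤ l) (hlr : l.toNat < r.toNat) (p : Nat) :
    pvW t (l + 1) r p = pvW t l r p - pvFacM (t.getD l.toNat 0) p := by
  unfold pvW
  have h1 : (l + 1).toNat = l.toNat + 1 := by omega
  rw [h1, Finset.sum_eq_sum_Ico_succ_bot hlr (fun i => pvFacM (t.getD i 0) p)]
  ring

lemma pvLoop_eq :
    ∀ (fuel : Nat) (t F : List Int) (cnt : PySem.Dict Int Int) (ov best left right : Int),
      Pre_longest_part t → pvInv t F cnt ov left right →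
      pvLoopA fuel t (t.length : Int) F best left right =
        pvLoopB fuel t (t.length : Int) cnt ov best left right := by
  intro fuel
  induction fuel with
  | zero => intros; rfl
  | succ fuel ih =>
    intro t F cnt ov best left right hpre hinv
    obtain ⟨hl0, hlr, hrn, hFlen, hF, hcnt, hov⟩ := hinv
    by_cases hrlt : right < (t.length : Int)
    · have hgood : ((PySem.List.max? F (fun y => y)).getD 0 ≤ 1) ↔ ov = 0 := by
        rw [pvMax_iff F (pvW t left right) hFlen hF, hov]
      by_cases hovz : ov = 0
      · -- grow: both sides absorb t[right]
        have hga : (PySem.List.max? F (fun y => y)).getD 0 ≤ 1 := hgood.mpr hovz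
        have hrtn : right.toNat < t.length := by omega
        have hxval : PySem.List.pyGetD t right 0 = t.getD right.toNat 0 := by
          simp [PySem.List.pyGetD, PySem.List.pyGet?, PySem.List.pyIdx?,
            (by omega : 0 ≤ right), (by omega : right < (t.length : Int)),
            List.getD_eq_getElem?_getD, List.getElem?_eq_getElem hrtn]
        set x := t.getD right.toNat 0 with hxdef
        have hxmem : x ∈ t := by
          rw [hxdef, List.getD_eq_getElem t 0 hrtn]
          exact List.getElem_mem hrtn
        obtain ⟨hx1, hxs⟩ := hpre x hxmem
        have hsm := pvSmooth_of_dvd hxs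
        have hnd2 : ∀ e : Int, 2 ≤ e → e < 2 → ¬ e ∣ x := by intro e h1 h2; omega
        have hfb : x + 2 - 2 ≤ ((x.toNat + 2 : Nat) : Int) := by push_cast; omega
        obtain ⟨hAl, hAe⟩ := pvFacLoopA_spec (x.toNat + 2) x 2 1 F hx1 (by omega) hnd2 hfb
        obtain ⟨hB1, hB2⟩ := pvFoldB_add (x.toNat + 2) x 2 cnt ov (pvW t left right)
          hx1 (by omega) hnd2 hfb hsm hcnt hov
        have hWnew : ∀ p : Nat, pvW t left (right + 1) p = pvW t left right p + pvFacM x p :=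
          fun p => pvW_succ_top t left right hl0 hlr p
        have hinv' : pvInv t (pvFacLoopA (x.toNat + 2) x 2 1 F)
            ((pvFacLoopB (x.toNat + 2) x 2 []).foldl pvAddStep (cnt, ov)).1
            ((pvFacLoopB (x.toNat + 2) x 2 []).foldl pvAddStep (cnt, ov)).2
            left (right + 1) := by
          refine ⟨hl0, by omega, by omega, by rw [hAl, hFlen], ?_, ?_, ?_⟩
          · intro p hp
            rw [hAe p (by omega), hF p hp, hWnew p]
            ring
          · intro q
            rw [hB1 q]
            by_cases hq2 : 0 ≤ q ∧ q < 1001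
            · rw [if_pos hq2, if_pos hq2, hWnew q.toNat]
            · rw [if_neg hq2, if_neg hq2]
          · rw [hB2]
            congr 1
            funext p
            rw [hWnew p]
        have hgood' : ((PySem.List.max? (pvFacLoopA (x.toNat + 2) x 2 1 F) (fun y => y)).getD 0 ≤ 1)
            ↔ ((pvFacLoopB (x.toNat + 2) x 2 []).foldl pvAddStep (cnt, ov)).2 = 0 := by
          rw [pvMax_iff _ (pvW t left (right + 1)) (by rw [hAl, hFlen]) hinv'.2.2.2.2.1,
            hinv'.2.2.2.2.2.2]
        simp only [pvLoopA, pvLoopB, if_pos hrlt, if_pos hga, if_pos hovz, hxval, ← hxdef]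
        have hbesteq :
            (if (PySem.List.max? (pvFacLoopA (x.toNat + 2) x 2 1 F) (fun y => y)).getD 0 ≤ 1
              then right + 1 - left else best) =
            (if ((pvFacLoopB (x.toNat + 2) x 2 []).foldl pvAddStep (cnt, ov)).2 = 0
              then right + 1 - left else best) := by
          by_cases h : ((pvFacLoopB (x.toNat + 2) x 2 []).foldl pvAddStep (cnt, ov)).2 = 0
          · rw [if_pos h, if_pos (hgood'.mpr h)]
          · rw [if_neg h, if_neg (fun hc => h (hgood'.mp hc))]
        rw [hbesteq]
        exact ih t _ _ _ _ left (right + 1) hpre hinv'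
      · -- shrink: both sides drop t[left]
        have hga : ¬ (PySem.List.max? F (fun y => y)).getD 0 ≤ 1 := fun hc => hovz (hgood.mp hc)
        have hltr : left.toNat < right.toNat := by
          apply pvWindow_pos t left right
          rw [← hov]
          exact hovz
        have hltn : left.toNat < t.length := by omega
        have hxval : PySem.List.pyGetD t left 0 = t.getD left.toNat 0 := by
          simp [PySem.List.pyGetD, PySem.List.pyGet?, PySem.List.pyIdx?,
            (by omega : 0 ≤ left), (by omega : left < (t.length : Int)),
            List.getD_eq_getElem?_getD, List.getElem?_eq_getElem hltn]
        set x := t.getD left.toNat 0 with hxdef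
        have hxmem : x ∈ t := by
          rw [hxdef, List.getD_eq_getElem t 0 hltn]
          exact List.getElem_mem hltn
        obtain ⟨hx1, hxs⟩ := hpre x hxmem
        have hsm := pvSmooth_of_dvd hxs
        have hnd2 : ∀ e : Int, 2 ≤ e → e < 2 → ¬ e ∣ x := by intro e h1 h2; omega
        have hfb : x + 2 - 2 ≤ ((x.toNat + 2 : Nat) : Int) := by push_cast; omega
        obtain ⟨hAl, hAe⟩ := pvFacLoopA_spec (x.toNat + 2) x 2 (-1) F hx1 (by omega) hnd2 hfb
        obtain ⟨hB1, hB2⟩ := pvFoldB_rem (x.toNat + 2) x 2 cnt ov (pvW t left right)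
          hx1 (by omega) hnd2 hfb hsm hcnt hov
        have hWnew : ∀ p : Nat, pvW t (left + 1) right p = pvW t left right p - pvFacM x p :=
          fun p => pvW_succ_bot t left right hl0 hltr p
        have hinv' : pvInv t (pvFacLoopA (x.toNat + 2) x 2 (-1) F)
            ((pvFacLoopB (x.toNat + 2) x 2 []).foldl pvRemStep (cnt, ov)).1
            ((pvFacLoopB (x.toNat + 2) x 2 []).foldl pvRemStep (cnt, ov)).2
            (left + 1) right := by
          refine ⟨by omega, by omega, by omega, by rw [hAl, hFlen], ?_, ?_, ?_⟩
          · intro p hp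
            rw [hAe p (by omega), hF p hp, hWnew p]
            ring
          · intro q
            rw [hB1 q]
            by_cases hq2 : 0 ≤ q ∧ q < 1001
            · rw [if_pos hq2, if_pos hq2, hWnew q.toNat]
            · rw [if_neg hq2, if_neg hq2]
          · rw [hB2]
            congr 1
            funext p
            rw [hWnew p]
        have hgood' : ((PySem.List.max? (pvFacLoopA (x.toNat + 2) x 2 (-1) F) (fun y => y)).getD 0 ≤ 1)
            ↔ ((pvFacLoopB (x.toNat + 2) x 2 []).foldl pvRemStep (cnt, ov)).2 = 0 := by
          rw [pvMax_iff _ (pvW t (left + 1) right) (by rw [hAl, hFlen]) hinv'.2.2.2.2.1,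
            hinv'.2.2.2.2.2.2]
        simp only [pvLoopA, pvLoopB, if_pos hrlt, if_neg hga, if_neg hovz, hxval, ← hxdef]
        have hbesteq :
            (if (PySem.List.max? (pvFacLoopA (x.toNat + 2) x 2 (-1) F) (fun y => y)).getD 0 ≤ 1
              then right - (left + 1) else best) =
            (if ((pvFacLoopB (x.toNat + 2) x 2 []).foldl pvRemStep (cnt, ov)).2 = 0
              then right - (left + 1) else best) := by
          by_cases h : ((pvFacLoopB (x.toNat + 2) x 2 []).foldl pvRemStep (cnt, ov)).2 = 0
          · rw [if_pos h, if_pos (hgood'.mpr h)]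
          · rw [if_neg h, if_neg (fun hc => h (hgood'.mp hc))]
        rw [hbesteq]
        exact ih t _ _ _ _ (left + 1) right hpre hinv'
    · simp only [pvLoopA, pvLoopB, if_neg hrlt]

-- ===== VERDICT (by name: the statement is the Claim_ definition above) =====
theorem longest_part_spec : Claim_equal_longest_part := by
  intro t _hdom hpre
  unfold Spec_longest_part longest_part longest_part_alt
  apply pvLoop_eq _ _ _ _ _ _ _ _ hpre
  have hW0 : ∀ p : Nat, pvW t 0 0 p = 0 := by
    intro p
    unfold pvW
    simp
  refine ⟨le_refl 0, le_refl 0, by omega, by rw [List.length_replicate], ?_, ?_, ?_⟩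
  · intro p hp
    rw [hW0 p, List.getD_eq_getElem?_getD, List.getElem?_replicate, if_pos hp]
    rfl
  · intro q
    rw [hW0]
    simp [PySem.Dict.getD_empty]
  · have h : pvOver (pvW t 0 0) = 0 := by
      unfold pvOver
      rw [Nat.cast_eq_zero, Finset.card_eq_zero, Finset.filter_eq_empty_iff]
      intro p _
      rw [hW0 p]
      omega
    exact h.symm
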